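-- pv_equiv track=rewrite | github.com/FOI-Bioinformatics/baitUtils | baitUtils/reference_analyzer.py | _count_complex_repeats
-- ===== SOURCE A (Python) =====
-- def _count_complex_repeats(sequence: str) -> int:
--     """Count complex repetitive patterns."""
--     if len(sequence) < 20:
--         return 0
--
--     # Look for longer repeated sequences
--     complex_repeats = 0
--
--     for length in range(10, min(51, len(sequence) // 2)):
--         seen = set()
--         for i in range(len(sequence) - length + 1):
--             subseq = sequence[i:i+length]
--             if 'N' in subseq:
--                 continue
--
--             if subseq in seen:
--                 complex_repeats += length
--             else:
--                 seen.add(subseq)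
--
--     return complex_repeats
-- ===== SOURCE B (Python) =====
-- def _count_complex_repeats(sequence: str) -> int:
--     """Count complex repetitive patterns (sort-then-scan: sort the N-free windows of
--     each length and count adjacent equal pairs, which are exactly the repeats)."""
--     if len(sequence) < 20:
--         return 0
--
--     n = len(sequence)
--     total = 0
--     for length in range(10, min(51, n // 2)):
--         ws = sorted(w for w in (sequence[i:i+length] for i in range(n - length + 1))
--                     if 'N' not in w)
--         # in a sorted list equal windows are contiguous, so every occurrence past
--         # the first shows up as one adjacent equal pair
--         for prev, cur in zip(ws, ws[1:]):
--             if prev == cur: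
--                 total += length
--     return total
-- ===== Notes on version B (the rewrite author's own statement) =====
-- stated objective: alternative
-- what changed: Replaced A's hash-set membership accumulator by a sort-then-scan per length: sort the N-free windows and add length per adjacent equal pair (equal windows are contiguous when sorted, so adjacent equal pairs are exactly the occurrences past the first).
import Mathlib
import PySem

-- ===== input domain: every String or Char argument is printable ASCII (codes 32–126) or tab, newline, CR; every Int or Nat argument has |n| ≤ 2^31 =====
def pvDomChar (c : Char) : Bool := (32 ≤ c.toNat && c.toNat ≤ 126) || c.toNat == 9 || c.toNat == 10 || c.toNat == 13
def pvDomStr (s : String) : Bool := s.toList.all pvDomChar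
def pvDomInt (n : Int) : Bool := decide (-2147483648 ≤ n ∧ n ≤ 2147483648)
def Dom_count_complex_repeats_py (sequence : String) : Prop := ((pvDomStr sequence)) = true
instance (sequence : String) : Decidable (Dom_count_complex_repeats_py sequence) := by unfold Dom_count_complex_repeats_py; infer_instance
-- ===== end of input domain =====

-- B replaces A's hash-set membership accumulator by sort-then-scan: per length it sorts the
-- N-free windows and adds length per adjacent equal pair (objective: alternative algorithm).

-- ===== PORT A =====
def count_complex_repeats_py (sequence : String) : Int :=
  if PySem.Str.len sequence < 20 then 0
  else
    (PySem.List.pyRange 10 (min 51 (PySem.Int.floordiv (PySem.Str.len sequence) 2)) 1).foldl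
      (fun complex_repeats length =>
        ((PySem.List.pyRange 0 (PySem.Str.len sequence - length + 1) 1).foldl
          (fun (st : PySem.Set String × Int) i =>
            let subseq := PySem.Str.slice sequence (some i) (some (i + length))
            if PySem.Str.isIn "N" subseq then st
            else if PySem.Set.contains st.1 subseq then (st.1, st.2 + length)
            else (PySem.Set.add st.1 subseq, st.2))
          (PySem.Set.empty, complex_repeats)).2)
      0

-- ===== PORT B =====
def count_complex_repeats_py_alt (sequence : String) : Int :=
  if PySem.Str.len sequence < 20 then 0
  else
    (PySem.List.pyRange 10 (min 51 (PySem.Int.floordiv (PySem.Str.len sequence) 2)) 1).foldl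
      (fun total length =>
        let ws := PySem.List.sorted
          (((PySem.List.pyRange 0 (PySem.Str.len sequence - length + 1) 1).map
              (fun i => PySem.Str.slice sequence (some i) (some (i + length)))).filter
            (fun w => !PySem.Str.isIn "N" w))
          (fun x => x) false
        (ws.zip (ws.drop 1)).foldl
          (fun t pc => if pc.1 == pc.2 then t + length else t) total)
      0

-- ===== PRECONDITION & SPEC =====
def Spec_count_complex_repeats_py (sequence : String) (out : Int) : Prop := out = count_complex_repeats_py_alt sequence
instance (sequence : String) (out : Int) : Decidable (Spec_count_complex_repeats_py sequence out) := by unfold Spec_count_complex_repeats_py; infer_instance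

-- ===== CLAIM (what is proved, stated in full; the proofs are below) =====
def Claim_equal_count_complex_repeats_py : Prop := ∀ (sequence : String), Dom_count_complex_repeats_py sequence → Spec_count_complex_repeats_py sequence (count_complex_repeats_py sequence)

-- ===== LEMMAS AND PROOFS =====

-- Invariant for A's inner loop over a list of window indices (f = window at index, p = "contains N"):
-- the seen set becomes S updated with the p-free windows, and the accumulator grows by
-- L * (number of p-free windows minus number of NEW distinct p-free windows).
lemma inner_loop_spec (L : Int) (p : String → Bool) (f : Int → String) (idxs : List Int)
    (S : PySem.Set String) (a : Int) :
    idxs.foldl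
      (fun (st : PySem.Set String × Int) i =>
        if p (f i) then st
        else if PySem.Set.contains st.1 (f i) then (st.1, st.2 + L)
        else (PySem.Set.add st.1 (f i), st.2)) (S, a)
    = (PySem.Set.update S ((idxs.map f).filter (fun w => !p w)),
       a + L * ((((idxs.map f).filter (fun w => !p w)).length : Int)
                - (((PySem.Set.update S ((idxs.map f).filter (fun w => !p w))).length : Int)
                   - (S.length : Int)))) := by
  induction idxs generalizing S a with
  | nil => simp [PySem.Set.update]
  | cons i idxs ih =>
    simp only [List.foldl_cons, List.map_cons, List.filter_cons]
    by_cases hp : p (f i) = true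
    · rw [if_pos hp, if_neg (show ¬((!p (f i)) = true) by simp [hp]), ih]
    · rw [if_neg hp, if_pos (show (!p (f i)) = true by simp [hp])]
      by_cases hmem : f i ∈ S
      · rw [if_pos (show PySem.Set.contains S (f i) = true from
              (PySem.Set.contains_iff S (f i)).mpr hmem), ih,
            PySem.Set.update_cons, PySem.Set.add_of_mem hmem]
        refine Prod.ext rfl ?_
        simp only [List.length_cons]
        push_cast
        ring
      · rw [if_neg (show ¬ PySem.Set.contains S (f i) = true by
              rw [PySem.Set.contains_iff]; exact hmem), ih,
            PySem.Set.update_cons]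
        refine Prod.ext rfl ?_
        have hln : ((PySem.Set.add S (f i)).length : Int) = (S.length : Int) + 1 := by
          rw [PySem.Set.add_of_not_mem hmem]
          push_cast [List.length_append, List.length_singleton]
          ring
        simp only [List.length_cons, hln]
        push_cast
        ring

-- B's inner loop in closed form: the zip-scan adds L per adjacent equal pair.
lemma adj_scan_spec (L a : Int) (l : List (String × String)) :
    l.foldl (fun t pc => if pc.1 == pc.2 then t + L else t) a
      = a + L * (l.countP (fun pc => pc.1 == pc.2) : Int) := by
  induction l generalizing a with
  | nil => simp
  | cons pc l ih =>
    simp only [List.foldl_cons, List.countP_cons]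
    by_cases h : (pc.1 == pc.2) = true
    · rw [if_pos h, ih]; simp [h]; ring
    · rw [if_neg h, ih]; simp [h]

-- set(l) has as many elements as set(l') when l and l' are rearrangements of each other.
lemma ofList_length_of_perm (l l' : List String) (h : l.Perm l') :
    (PySem.Set.ofList l).length = (PySem.Set.ofList l').length := by
  have hperm : (PySem.Set.ofList l).Perm (PySem.Set.ofList l') := by
    rw [List.perm_ext_iff_of_nodup (PySem.Set.nodup_ofList l) (PySem.Set.nodup_ofList l')]
    intro x
    rw [PySem.Set.mem_ofList, PySem.Set.mem_ofList]
    exact ⟨fun hx => h.mem_iff.mp hx, fun hx => h.mem_iff.mpr hx⟩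
  exact hperm.length_eq

-- In a sorted list equal elements are contiguous, so the adjacent equal pairs plus the
-- distinct elements account for every element.
lemma adj_count_sorted (s : List String) (hs : s.Pairwise (· ≤ ·)) :
    ((s.zip (s.drop 1)).countP (fun pc => pc.1 == pc.2)) + (PySem.Set.ofList s).length
      = s.length := by
  induction s with
  | nil => simp [PySem.Set.ofList]
  | cons a t ih =>
    match t with
    | [] => simp [PySem.Set.ofList, PySem.Set.add]
    | b :: t' =>
      have hpa := (List.pairwise_cons.mp hs).1
      have hst : (b :: t').Pairwise (· ≤ ·) := (List.pairwise_cons.mp hs).2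
      have iht := ih hst
      simp only [List.drop_one, List.tail_cons, List.zip_cons_cons, List.countP_cons,
        List.length_cons] at iht ⊢
      by_cases hab : a = b
      · -- ofList (a :: a :: t') = ofList (a :: t'): the duplicate head is absorbed
        have hof : PySem.Set.ofList (a :: b :: t') = PySem.Set.ofList (b :: t') := by
          subst hab
          rw [PySem.Set.ofList_cons, PySem.Set.ofList_cons]
          simp [PySem.Set.discard, List.filter_filter]
        rw [hof]
        have hb : ((a, b).1 == (a, b).2) = true := by simp [hab]
        simp only [hb, if_true]
        omega
      · have hnotmem : a ∉ (b :: t') := by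
          intro hmem
          rcases List.mem_cons.mp hmem with h1 | h2
          · exact hab h1
          · have hab' : a < b := lt_of_le_of_ne (hpa b (List.mem_cons_self)) hab
            have hbx : b ≤ a := (List.pairwise_cons.mp hst).1 a h2
            exact absurd (lt_of_lt_of_le hab' hbx) (lt_irrefl a)
        have hof : PySem.Set.ofList (a :: b :: t') = a :: PySem.Set.ofList (b :: t') := by
          rw [PySem.Set.ofList_cons]
          congr 1
          refine List.filter_eq_self.mpr ?_
          intro y hy
          have hym : y ∈ (b :: t') := by simpa [PySem.Set.mem_ofList] using hy
          simp only [Bool.not_eq_eq_eq_not, Bool.not_true, beq_eq_false_iff_ne]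
          intro he; exact hnotmem (he ▸ hym)
        have hb : ((a, b).1 == (a, b).2) = false := by simp [hab]
        simp only [hof, List.length_cons, hb, Bool.false_eq_true, if_false]
        omega

-- The two per-length loop bodies agree for every accumulator and length.
lemma body_eq (sequence : String) (total L : Int) :
    ((PySem.List.pyRange 0 (PySem.Str.len sequence - L + 1) 1).foldl
        (fun (st : PySem.Set String × Int) i =>
          let subseq := PySem.Str.slice sequence (some i) (some (i + L))
          if PySem.Str.isIn "N" subseq then st
          else if PySem.Set.contains st.1 subseq then (st.1, st.2 + L)
          else (PySem.Set.add st.1 subseq, st.2))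
        (PySem.Set.empty, total)).2
    = (let ws := PySem.List.sorted
          (((PySem.List.pyRange 0 (PySem.Str.len sequence - L + 1) 1).map
              (fun i => PySem.Str.slice sequence (some i) (some (i + L)))).filter
            (fun w => !PySem.Str.isIn "N" w))
          (fun x => x) false
       (ws.zip (ws.drop 1)).foldl
          (fun t pc => if pc.1 == pc.2 then t + L else t) total) := by
  set idxs := PySem.List.pyRange 0 (PySem.Str.len sequence - L + 1) 1 with hidxs
  set valid := ((idxs.map (fun i => PySem.Str.slice sequence (some i) (some (i + L)))).filter
      (fun w => !PySem.Str.isIn "N" w)) with hvalid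
  set ws := PySem.List.sorted valid (fun x => x) false with hws
  have hA := inner_loop_spec L (fun w => PySem.Str.isIn "N" w)
      (fun i => PySem.Str.slice sequence (some i) (some (i + L))) idxs PySem.Set.empty total
  rw [hA]
  simp only [← hvalid, PySem.Set.empty, PySem.Set.update_nil_left, List.length_nil,
    Nat.cast_zero, sub_zero]
  rw [adj_scan_spec]
  -- L * (|valid| - |set(valid)|) = L * countAdj(sorted valid)
  have hperm : ws.Perm valid := PySem.List.sorted_perm valid (fun x => x) false
  have hlen : ws.length = valid.length := PySem.List.length_sorted valid (fun x => x) false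
  have hset : (PySem.Set.ofList ws).length = (PySem.Set.ofList valid).length :=
    ofList_length_of_perm ws valid hperm
  have hpair : ws.Pairwise (· ≤ ·) := PySem.List.sorted_pairwise valid (fun x => x)
  have hcnt := adj_count_sorted ws hpair
  have : ((ws.zip (ws.drop 1)).countP (fun pc => pc.1 == pc.2) : Int)
      = (valid.length : Int) - ((PySem.Set.ofList valid).length : Int) := by
    omega
  rw [this]

-- ===== VERDICT (by name: the statement is the Claim_ definition above) =====
theorem count_complex_repeats_py_spec : Claim_equal_count_complex_repeats_py := by
  intro sequence _
  unfold Spec_count_complex_repeats_py count_complex_repeats_py count_complex_repeats_py_alt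
  by_cases h : PySem.Str.len sequence < 20
  · rw [if_pos h, if_pos h]
  · rw [if_neg h, if_neg h]
    apply PySem.List.foldl_congr_mem
    intro acc L _
    exact body_eq sequence acc L
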